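-- pv_equiv track=rewrite | github.com/Danila996/thirdPoint | 算法代码/DRLFluidManipulate/RoutingCode/GridRoutingEnv.py | _can_cover_all
-- ===== SOURCE A (Python) =====
-- def _can_cover_all(pos, task):
--     """
--         判断给定坐标集合在去掉某坐标后是否在网格中连续
--         :param pos, task: 需要去除的坐标点，存储坐标元组的任务，如 {(2, 4), (3, 3), (3, 4)}
--         :return: True 表示连续，否则 False
--         """
--     area_set = set(task["target_area"])
--     # 转换为 set 以便快速查找
--     area_set.remove(pos)
--     # 随便选取一个坐标作为起始点
--     start = next(iter(area_set))
--     visited = set()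
--     stack = [start]
--
--     while stack:
--         x, y = stack.pop()
--         if (x, y) in visited:
--             continue
--         visited.add((x, y))
--         # 检查四个方向：上下左右
--         for dx, dy in [(1, 0), (-1, 0), (0, 1), (0, -1)]:
--             neighbor = (x + dx, y + dy)
--             if neighbor in area_set and neighbor not in visited:
--                 stack.append(neighbor)
--
--     return len(visited) == len(area_set)
-- ===== SOURCE B (Python) =====
-- def _can_cover_all(pos, task):
--     """Round-based saturation: repeatedly sweep the whole area, absorbing any
--     cell adjacent to the already-reached region, until a sweep changes nothing."""
--     area_set = set(task["target_area"])
--     area_set.remove(pos)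
--     start = next(iter(area_set))
--     reach = {start}
--     changed = True
--     while changed:
--         changed = False
--         for (x, y) in area_set:
--             if (x, y) not in reach and (
--                 (x + 1, y) in reach or (x - 1, y) in reach
--                 or (x, y + 1) in reach or (x, y - 1) in reach
--             ):
--                 reach.add((x, y))
--                 changed = True
--     return len(reach) == len(area_set)
-- ===== Notes on version B (the rewrite author's own statement) =====
-- stated objective: alternative
-- what changed: Replaced the stack-based DFS flood fill (visited set + explicit stack) by a round-based saturation: repeatedly sweep the whole cell set, absorbing any cell with a neighbour in the already-reached region, until a sweep changes nothing.
import Mathlib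
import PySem

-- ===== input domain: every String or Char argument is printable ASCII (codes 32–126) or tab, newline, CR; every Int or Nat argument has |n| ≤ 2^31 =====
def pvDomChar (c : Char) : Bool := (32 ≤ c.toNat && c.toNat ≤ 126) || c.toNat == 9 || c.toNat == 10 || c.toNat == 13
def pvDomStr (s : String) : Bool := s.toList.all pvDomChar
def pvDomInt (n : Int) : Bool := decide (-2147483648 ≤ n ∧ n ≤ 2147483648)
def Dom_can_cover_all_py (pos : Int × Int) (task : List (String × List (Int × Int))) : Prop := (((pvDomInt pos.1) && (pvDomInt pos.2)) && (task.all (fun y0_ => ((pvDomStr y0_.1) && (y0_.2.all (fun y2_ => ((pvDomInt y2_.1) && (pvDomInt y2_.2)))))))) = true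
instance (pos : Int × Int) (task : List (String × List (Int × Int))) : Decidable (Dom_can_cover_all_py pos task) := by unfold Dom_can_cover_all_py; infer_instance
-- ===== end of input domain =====

-- B replaces A's stack-based DFS flood fill by round-based saturation sweeps (alternative algorithm, same results).
-- Both raise (KeyError / StopIteration) on the same inputs; those are excluded by Pre_.
-- A's `next(iter(area_set))` picks a hash-order start cell; the final boolean does not depend on the start choice,
-- so the ports use the set's first-insertion element as start.

-- ===== PORT A =====
-- the four neighbours (x+dx, y+dy) for (dx, dy) in [(1,0),(-1,0),(0,1),(0,-1)], in A's loop order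
def pvNbrs (c : Int × Int) : List (Int × Int) :=
  [(c.1 + 1, c.2), (c.1 - 1, c.2), (c.1, c.2 + 1), (c.1, c.2 - 1)]

-- the `while stack:` loop; the Lean list's HEAD is the Python stack's top (stack.pop() = last element),
-- so each push is a cons; fuel only makes the loop total, 4*|S|+1 is proved sufficient below.
def pvDfsLoop (S : List (Int × Int)) : Nat → List (Int × Int) → List (Int × Int) → List (Int × Int)
  | 0, _, visited => visited
  | _ + 1, [], visited => visited
  | fuel + 1, c :: stack, visited =>
    if c ∈ visited then pvDfsLoop S fuel stack visited
    else pvDfsLoop S fuel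
      ((pvNbrs c).foldl
        (fun st n => if n ∈ S ∧ n ∉ PySem.Set.add visited c then n :: st else st) stack)
      (PySem.Set.add visited c)

def can_cover_all_py (pos : Int × Int) (task : List (String × List (Int × Int))) : Bool :=
  match (PySem.Dict.ofList task).get? "target_area" with
  | none => false      -- KeyError: outside Pre_
  | some area =>
    let s0 : PySem.Set (Int × Int) := PySem.Set.ofList area
    match PySem.Set.remove? s0 pos with
    | none => false    -- KeyError: outside Pre_
    | some s =>
      match s with
      | [] => false    -- StopIteration: outside Pre_
      | start :: _ =>
        (pvDfsLoop s (4 * s.length + 1) [start] PySem.Set.empty).length == s.length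

-- ===== PORT B =====
-- the body of B's `for (x, y) in area_set:` loop on the threaded state (reach, changed)
def pvStep (st : List (Int × Int) × Bool) (c : Int × Int) : List (Int × Int) × Bool :=
  if c ∉ st.1 ∧ ((c.1 + 1, c.2) ∈ st.1 ∨ (c.1 - 1, c.2) ∈ st.1 ∨
                 (c.1, c.2 + 1) ∈ st.1 ∨ (c.1, c.2 - 1) ∈ st.1)
  then (PySem.Set.add st.1 c, true) else st

-- one full sweep over the area
def pvRound (S : List (Int × Int)) (reach : List (Int × Int)) : List (Int × Int) × Bool :=
  S.foldl pvStep (reach, false)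

-- the `while changed:` loop; fuel only makes it total, |S| is proved sufficient below
def pvSaturate (S : List (Int × Int)) : Nat → List (Int × Int) → List (Int × Int)
  | 0, reach => reach
  | fuel + 1, reach =>
    let out := pvRound S reach
    if out.2 then pvSaturate S fuel out.1 else out.1

def can_cover_all_py_alt (pos : Int × Int) (task : List (String × List (Int × Int))) : Bool :=
  match (PySem.Dict.ofList task).get? "target_area" with
  | none => false
  | some area =>
    let s0 : PySem.Set (Int × Int) := PySem.Set.ofList area
    match PySem.Set.remove? s0 pos with
    | none => false
    | some s =>
      match s with
      | [] => false
      | start :: _ =>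
        (pvSaturate s s.length [start]).length == s.length

-- ===== PRECONDITION & SPEC =====
-- Pre_ excludes exactly the inputs where A raises: a missing "target_area" key (KeyError),
-- pos not in the area (KeyError from set.remove), and no cell other than pos (StopIteration).
def Pre_can_cover_all_py (pos : Int × Int) (task : List (String × List (Int × Int))) : Prop :=
  (PySem.Dict.ofList task).contains "target_area" = true ∧
  pos ∈ (PySem.Dict.ofList task).getD "target_area" [] ∧
  ∃ q ∈ (PySem.Dict.ofList task).getD "target_area" [], q ≠ pos
instance (pos : Int × Int) (task : List (String × List (Int × Int))) : Decidable (Pre_can_cover_all_py pos task) := by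
  unfold Pre_can_cover_all_py; infer_instance

def pvWitness_can_cover_all_py : (Int × Int) × (List (String × List (Int × Int))) :=
  ((0, 0), [("target_area", [(0, 0), (0, 1)])])

def Spec_can_cover_all_py (pos : Int × Int) (task : List (String × List (Int × Int))) (out : Bool) : Prop := out = can_cover_all_py_alt pos task
instance (pos : Int × Int) (task : List (String × List (Int × Int))) (out : Bool) : Decidable (Spec_can_cover_all_py pos task out) := by unfold Spec_can_cover_all_py; infer_instance

-- ===== CLAIM (what is proved, stated in full; the proofs are below) =====
def Claim_equal_can_cover_all_py : Prop := ∀ (pos : Int × Int) (task : List (String × List (Int × Int))), Dom_can_cover_all_py pos task → Pre_can_cover_all_py pos task → Spec_can_cover_all_py pos task (can_cover_all_py pos task)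

-- ===== LEMMAS AND PROOFS =====

-- a step of grid adjacency staying inside S
def pvRel (S : List (Int × Int)) (a b : Int × Int) : Prop := b ∈ S ∧ b ∈ pvNbrs a

-- reachability from s through S
def pvReach (S : List (Int × Int)) (s c : Int × Int) : Prop := Relation.ReflTransGen (pvRel S) s c

lemma pvNbrs_symm (a b : Int × Int) : a ∈ pvNbrs b ↔ b ∈ pvNbrs a := by
  simp [pvNbrs, Prod.ext_iff]
  omega

-- a set containing start and closed under pvRel-steps is exactly the reachable set
lemma pvClosed_iff (S : List (Int × Int)) (start : Int × Int) (V : List (Int × Int))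
    (hV : ∀ v ∈ V, pvReach S start v) (hs : start ∈ V)
    (hcl : ∀ v ∈ V, ∀ n, pvRel S v n → n ∈ V) :
    ∀ c, c ∈ V ↔ pvReach S start c := by
  intro c
  constructor
  · exact hV c
  · intro h
    induction h with
    | refl => exact hs
    | tail _ hrel ih => exact hcl _ ih _ hrel

-- membership after A's push loop
lemma pvPush_mem (S vis : List (Int × Int)) (ns : List (Int × Int)) :
    ∀ st m, (m ∈ ns.foldl (fun st n => if n ∈ S ∧ n ∉ vis then n :: st else st) st ↔
      m ∈ st ∨ (m ∈ ns ∧ m ∈ S ∧ m ∉ vis)) := by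
  induction ns with
  | nil => simp
  | cons n ns ih =>
    intro st m
    simp only [List.foldl_cons]
    by_cases h : n ∈ S ∧ n ∉ vis
    · rw [if_pos h, ih]
      simp only [List.mem_cons]
      constructor
      · rintro (⟨rfl | hm⟩ | h2) <;> tauto
      · rintro (hm | ⟨rfl | hmn, h2⟩) <;> tauto
    · rw [if_neg h, ih]
      simp only [List.mem_cons]
      constructor
      · rintro (hm | h2) <;> tauto
      · rintro (hm | ⟨rfl | hmn, h2⟩) <;> tauto

-- length after A's push loop
lemma pvPush_length (S vis : List (Int × Int)) (ns : List (Int × Int)) :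
    ∀ st, (ns.foldl (fun st n => if n ∈ S ∧ n ∉ vis then n :: st else st) st).length ≤
      st.length + ns.length := by
  induction ns with
  | nil => simp
  | cons n ns ih =>
    intro st
    simp only [List.foldl_cons]
    by_cases h : n ∈ S ∧ n ∉ vis
    · rw [if_pos h]
      calc _ ≤ (n :: st).length + ns.length := ih _
        _ = st.length + (n :: ns).length := by simp; omega
    · rw [if_neg h]
      calc _ ≤ st.length + ns.length := ih _
        _ ≤ st.length + (n :: ns).length := by simp

-- terminal state: visited is closed and contains start, hence is the reachable set
lemma pvDfs_final (S : List (Int × Int)) (start : Int × Int) (V : List (Int × Int))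
    (hv : ∀ v ∈ V, v ∈ S ∧ pvReach S start v)
    (hcl : ∀ v ∈ V, ∀ n, n ∈ pvNbrs v → n ∈ S → n ∈ V)
    (hs : start ∈ V) (hnd : V.Nodup) :
    V.Nodup ∧ ∀ c, c ∈ V ↔ pvReach S start c :=
  ⟨hnd, pvClosed_iff S start V (fun v h => (hv v h).2) hs
    (fun v hv' n hrel => hcl v hv' n hrel.2 hrel.1)⟩

-- the DFS loop computes exactly the reachable set, given enough fuel
lemma pvDfs_spec (S : List (Int × Int)) (start : Int × Int) :
    ∀ fuel stack visited,
    (∀ s ∈ stack, s ∈ S ∧ pvReach S start s) →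
    (∀ v ∈ visited, v ∈ S ∧ pvReach S start v) →
    (∀ v ∈ visited, ∀ n, n ∈ pvNbrs v → n ∈ S → n ∈ visited ∨ n ∈ stack) →
    visited.Nodup →
    (start ∈ visited ∨ start ∈ stack) →
    4 * (S.toFinset \ visited.toFinset).card + stack.length ≤ fuel →
    (pvDfsLoop S fuel stack visited).Nodup ∧
      ∀ c, c ∈ pvDfsLoop S fuel stack visited ↔ pvReach S start c := by
  intro fuel
  induction fuel with
  | zero =>
    intro stack visited hstack hvis hcl hnd hs hm
    have hst : stack = [] := by
      cases stack with
      | nil => rfl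
      | cons a t => simp [List.length_cons] at hm
    subst hst
    simp only [pvDfsLoop]
    exact pvDfs_final S start visited hvis
      (fun v hv n hnb hnS => by
        rcases hcl v hv n hnb hnS with h | h
        · exact h
        · simp at h)
      (hs.resolve_right (by simp)) hnd
  | succ fuel ih =>
    intro stack visited hstack hvis hcl hnd hs hm
    cases stack with
    | nil =>
      simp only [pvDfsLoop]
      exact pvDfs_final S start visited hvis
        (fun v hv n hnb hnS => by
          rcases hcl v hv n hnb hnS with h | h
          · exact h
          · simp at h)
        (hs.resolve_right (by simp)) hnd
    | cons c rest =>
      simp only [pvDfsLoop]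
      by_cases hc : c ∈ visited
      · rw [if_pos hc]
        apply ih rest visited
          (fun s h => hstack s (List.mem_cons_of_mem _ h)) hvis
        · intro v hv n hnb hnS
          rcases hcl v hv n hnb hnS with h | h
          · exact Or.inl h
          · rcases List.mem_cons.mp h with rfl | h
            · exact Or.inl hc
            · exact Or.inr h
        · exact hnd
        · rcases hs with h | h
          · exact Or.inl h
          · rcases List.mem_cons.mp h with rfl | h
            · exact Or.inl hc
            · exact Or.inr h
        · simp only [List.length_cons] at hm; omega
      · rw [if_neg hc]
        have hcS : c ∈ S := (hstack c List.mem_cons_self).1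
        have hcR : pvReach S start c := (hstack c List.mem_cons_self).2
        have hadd : PySem.Set.add visited c = visited ++ [c] :=
          PySem.Set.add_of_not_mem hc
        rw [hadd]
        have hmemv : ∀ m : Int × Int, m ∈ visited ++ [c] ↔ m ∈ visited ∨ m = c := by
          intro m; simp
        apply ih
        · intro m hmm
          rcases (pvPush_mem S (visited ++ [c]) (pvNbrs c) rest m).mp hmm with h | ⟨hnb, hmS, _⟩
          · exact hstack m (List.mem_cons_of_mem _ h)
          · exact ⟨hmS, hcR.tail ⟨hmS, hnb⟩⟩
        · intro v hv
          rcases (hmemv v).mp hv with h | rfl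
          · exact hvis v h
          · exact ⟨hcS, hcR⟩
        · intro v hv n hnb hnS
          rcases (hmemv v).mp hv with h | rfl
          · rcases hcl v h n hnb hnS with h2 | h2
            · exact Or.inl ((hmemv n).mpr (Or.inl h2))
            · rcases List.mem_cons.mp h2 with rfl | h2
              · exact Or.inl ((hmemv n).mpr (Or.inr rfl))
              · exact Or.inr ((pvPush_mem S (visited ++ [c]) (pvNbrs c) rest n).mpr (Or.inl h2))
          · by_cases hnv : n ∈ visited ++ [v]
            · exact Or.inl hnv
            · exact Or.inr ((pvPush_mem S (visited ++ [v]) (pvNbrs v) rest n).mpr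
                (Or.inr ⟨hnb, hnS, hnv⟩))
        · simp [List.nodup_append, hnd]
          exact fun a b hab heq => hc (heq ▸ hab)
        · rcases hs with h | h
          · exact Or.inl ((hmemv start).mpr (Or.inl h))
          · rcases List.mem_cons.mp h with rfl | h
            · exact Or.inl ((hmemv start).mpr (Or.inr rfl))
            · exact Or.inr ((pvPush_mem S (visited ++ [c]) (pvNbrs c) rest start).mpr (Or.inl h))
        · have hlen : ((pvNbrs c).foldl
              (fun st n => if n ∈ S ∧ n ∉ visited ++ [c] then n :: st else st) rest).length ≤
              rest.length + 4 := pvPush_length S (visited ++ [c]) (pvNbrs c) rest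
          have hfs : (visited ++ [c]).toFinset = insert c visited.toFinset := by
            simp [List.toFinset_append]
          rw [hfs, Finset.sdiff_insert]
          have hcmem : c ∈ S.toFinset \ visited.toFinset := by
            simp [hcS, hc]
          have hcard := Finset.card_erase_of_mem hcmem
          have hpos : 1 ≤ (S.toFinset \ visited.toFinset).card :=
            Finset.card_pos.mpr ⟨c, hcmem⟩
          simp only [List.length_cons] at hm
          omega

-- a cell with one of its four grid neighbours already reached is itself reachable
lemma pvCondReach (S : List (Int × Int)) (start c : Int × Int) (hcS : c ∈ S)
    (r : List (Int × Int)) (hinv : ∀ v ∈ r, v ∈ S ∧ pvReach S start v)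
    (h : (c.1 + 1, c.2) ∈ r ∨ (c.1 - 1, c.2) ∈ r ∨ (c.1, c.2 + 1) ∈ r ∨ (c.1, c.2 - 1) ∈ r) :
    pvReach S start c := by
  have hex : ∃ n, n ∈ pvNbrs c ∧ n ∈ r := by
    rcases h with h | h | h | h
    · exact ⟨_, by simp [pvNbrs], h⟩
    · exact ⟨_, by simp [pvNbrs], h⟩
    · exact ⟨_, by simp [pvNbrs], h⟩
    · exact ⟨_, by simp [pvNbrs], h⟩
  obtain ⟨n, hn, hnr⟩ := hex
  exact (hinv n hnr).2.tail ⟨hcS, (pvNbrs_symm c n).mpr hn⟩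

-- one sweep of B: characterisation of the threaded (reach, changed) fold
lemma pvRoundAux (S : List (Int × Int)) (start : Int × Int) (cs : List (Int × Int))
    (hcs : ∀ c ∈ cs, c ∈ S) :
    ∀ r ch, r.Nodup → (∀ v ∈ r, v ∈ S ∧ pvReach S start v) →
    (cs.foldl pvStep (r, ch)).1.Nodup ∧
    (∀ v ∈ (cs.foldl pvStep (r, ch)).1, v ∈ S ∧ pvReach S start v) ∧
    (∀ v ∈ r, v ∈ (cs.foldl pvStep (r, ch)).1) ∧
    r.length ≤ (cs.foldl pvStep (r, ch)).1.length ∧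
    ((cs.foldl pvStep (r, ch)).2 = ch ∨ r.length < (cs.foldl pvStep (r, ch)).1.length) ∧
    ((cs.foldl pvStep (r, ch)).2 = false →
      (cs.foldl pvStep (r, ch)).1 = r ∧
      ∀ c ∈ cs, c ∉ r → ∀ n, n ∈ pvNbrs c → n ∉ r) := by
  induction cs with
  | nil =>
    intro r ch hnd hinv
    exact ⟨hnd, hinv, fun v h => h, le_refl _, Or.inl rfl,
      fun _ => ⟨rfl, by simp⟩⟩
  | cons c cs ih =>
    intro r ch hnd hinv
    simp only [List.foldl_cons]
    have hcS : c ∈ S := hcs c List.mem_cons_self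
    by_cases hcond : c ∉ r ∧ ((c.1 + 1, c.2) ∈ r ∨ (c.1 - 1, c.2) ∈ r ∨
        (c.1, c.2 + 1) ∈ r ∨ (c.1, c.2 - 1) ∈ r)
    · have hstep : pvStep (r, ch) c = (r ++ [c], true) := by
        rw [pvStep, if_pos hcond, PySem.Set.add_of_not_mem hcond.1]
      rw [hstep]
      have hnd' : (r ++ [c]).Nodup := by
        simp [List.nodup_append, hnd]
        exact fun a b hab heq => hcond.1 (heq ▸ hab)
      have hinv' : ∀ v ∈ r ++ [c], v ∈ S ∧ pvReach S start v := by
        intro v hv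
        rcases List.mem_append.mp hv with h | h
        · exact hinv v h
        · rw [List.mem_singleton] at h
          subst h
          exact ⟨hcS, pvCondReach S start v hcS r hinv hcond.2⟩
      obtain ⟨c1, c2, c3, c4, c5, c6⟩ :=
        ih (fun x hx => hcs x (List.mem_cons_of_mem _ hx)) (r ++ [c]) true hnd' hinv'
      refine ⟨c1, c2, ?_, ?_, ?_, ?_⟩
      · exact fun v hv => c3 v (List.mem_append.mpr (Or.inl hv))
      · calc r.length ≤ (r ++ [c]).length := by simp
          _ ≤ _ := c4
      · right
        calc r.length < (r ++ [c]).length := by simp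
          _ ≤ _ := c4
      · intro hfalse
        rcases c5 with h | h
        · rw [hfalse] at h; cases h
        · have := (c6 hfalse).1
          rw [this] at h
          simp at h
    · have hstep : pvStep (r, ch) c = (r, ch) := by
        rw [pvStep, if_neg hcond]
      rw [hstep]
      have hcond' : c ∉ r → ¬((c.1 + 1, c.2) ∈ r ∨ (c.1 - 1, c.2) ∈ r ∨
          (c.1, c.2 + 1) ∈ r ∨ (c.1, c.2 - 1) ∈ r) := fun h1 h2 => hcond ⟨h1, h2⟩
      obtain ⟨c1, c2, c3, c4, c5, c6⟩ :=
        ih (fun x hx => hcs x (List.mem_cons_of_mem _ hx)) r ch hnd hinv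
      refine ⟨c1, c2, c3, c4, c5, ?_⟩
      intro hfalse
      refine ⟨(c6 hfalse).1, ?_⟩
      intro x hx hxr n hn hnr
      rcases List.mem_cons.mp hx with rfl | hx
      · apply hcond' hxr
        have hn' : n = (x.1 + 1, x.2) ∨ n = (x.1 - 1, x.2) ∨
            n = (x.1, x.2 + 1) ∨ n = (x.1, x.2 - 1) := by
          simpa [pvNbrs] using hn
        rcases hn' with rfl | rfl | rfl | rfl
        · exact Or.inl hnr
        · exact Or.inr (Or.inl hnr)
        · exact Or.inr (Or.inr (Or.inl hnr))
        · exact Or.inr (Or.inr (Or.inr hnr))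
      · exact (c6 hfalse).2 x hx hxr n hn hnr

-- the saturation loop computes exactly the reachable set, given enough fuel
lemma pvSat_spec (S : List (Int × Int)) (start : Int × Int) :
    ∀ fuel reach,
    reach.Nodup → (∀ v ∈ reach, v ∈ S ∧ pvReach S start v) → start ∈ reach →
    S.length + 1 ≤ fuel + reach.length →
    (pvSaturate S fuel reach).Nodup ∧
      ∀ c, c ∈ pvSaturate S fuel reach ↔ pvReach S start c := by
  intro fuel
  induction fuel with
  | zero =>
    intro reach hnd hinv hstart hm
    exfalso
    have h1 : reach.toFinset.card = reach.length := List.toFinset_card_of_nodup hnd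
    have h2 : reach.toFinset ⊆ S.toFinset := by
      intro x hx
      rw [List.mem_toFinset] at hx ⊢
      exact (hinv x hx).1
    have h3 : reach.toFinset.card ≤ S.toFinset.card := Finset.card_le_card h2
    have h4 : S.toFinset.card ≤ S.length := S.toFinset_card_le
    omega
  | succ fuel ih =>
    intro reach hnd hinv hstart hm
    obtain ⟨c1, c2, c3, c4, c5, c6⟩ :=
      pvRoundAux S start S (fun c hc => hc) reach false hnd hinv
    simp only [pvSaturate, pvRound.eq_def]
    cases hout : (List.foldl pvStep (reach, false) S).2 with
    | false =>
      simp only [if_neg Bool.false_ne_true]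
      have hfc := c6 hout
      rw [hfc.1]
      refine ⟨hnd, pvClosed_iff S start reach (fun v h => (hinv v h).2) hstart ?_⟩
      intro v hv n hrel
      by_contra hn
      exact hfc.2 n hrel.1 hn v ((pvNbrs_symm v n).mpr hrel.2) hv
    | true =>

      apply ih _ c1 c2 (c3 start hstart)
      have hlt : reach.length < (List.foldl pvStep (reach, false) S).1.length := by
        rcases c5 with h | h
        · rw [hout] at h; cases h
        · exact h
      omega

-- ===== VERDICT (by name: the statement is the Claim_ definition above) =====
-- same reachable set ⇒ same length ⇒ same boolean
lemma pvSameLen (VA VB : List (Int × Int)) (hA : VA.Nodup) (hB : VB.Nodup)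
    (h : ∀ c, c ∈ VA ↔ c ∈ VB) : VA.length = VB.length :=
  ((List.perm_ext_iff_of_nodup hA hB).mpr h).length_eq

theorem can_cover_all_py_spec : Claim_equal_can_cover_all_py := by
  unfold Claim_equal_can_cover_all_py
  intro pos task _hdom hpre
  unfold Spec_can_cover_all_py
  obtain ⟨hcont, hpos, q, hq, hqne⟩ := hpre
  -- the "target_area" lookup succeeds
  obtain ⟨area, harea⟩ : ∃ area, (PySem.Dict.ofList task).get? "target_area" = some area := by
    cases h : (PySem.Dict.ofList task).get? "target_area" with
    | none =>
      rw [(PySem.Dict.get?_eq_none_iff_contains _ _).mp h] at hcont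
      cases hcont
    | some a => exact ⟨a, rfl⟩
  have hgetD : (PySem.Dict.ofList task).getD "target_area" [] = area := by
    rw [PySem.Dict.getD_eq_get?_getD, harea]; rfl
  rw [hgetD] at hpos hq
  -- pos is removed from the deduplicated area
  have hpos0 : pos ∈ PySem.Set.ofList area := (PySem.Set.mem_ofList _ _).mpr hpos
  have hrem : PySem.Set.remove? (PySem.Set.ofList area) pos =
      some (PySem.Set.discard (PySem.Set.ofList area) pos) := PySem.Set.remove?_of_mem hpos0
  have hqS : q ∈ PySem.Set.discard (PySem.Set.ofList area) pos :=
    (PySem.Set.mem_discard _ _ _).mpr ⟨(PySem.Set.mem_ofList _ _).mpr hq, hqne⟩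
  obtain ⟨start, rest, hS⟩ : ∃ start rest,
      PySem.Set.discard (PySem.Set.ofList area) pos = start :: rest := by
    cases h : PySem.Set.discard (PySem.Set.ofList area) pos with
    | nil => rw [h] at hqS; cases hqS
    | cons a t => exact ⟨a, t, rfl⟩
  simp only [can_cover_all_py, can_cover_all_py_alt, harea, hrem, hS]
  have hstart : start ∈ start :: rest := List.mem_cons_self
  have hAres := pvDfs_spec (start :: rest) start (4 * (start :: rest).length + 1)
    [start] []
    (by intro s hs; rw [List.mem_singleton] at hs; subst hs
        exact ⟨hstart, Relation.ReflTransGen.refl⟩)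
    (by simp) (by simp) List.nodup_nil (Or.inr List.mem_cons_self)
    (by
      have h1 : ((start :: rest).toFinset \ ([] : List (Int × Int)).toFinset).card ≤
          (start :: rest).length := by
        calc ((start :: rest).toFinset \ ([] : List (Int × Int)).toFinset).card
            ≤ (start :: rest).toFinset.card := Finset.card_le_card Finset.sdiff_subset
          _ ≤ (start :: rest).length := (start :: rest).toFinset_card_le
      simp only [List.length_singleton]
      omega)
  have hBres := pvSat_spec (start :: rest) start (start :: rest).length [start]
    (List.nodup_singleton _)
    (by intro v hv; rw [List.mem_singleton] at hv; subst hv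
        exact ⟨hstart, Relation.ReflTransGen.refl⟩)
    List.mem_cons_self
    (by simp)
  have hlen : (pvDfsLoop (start :: rest) (4 * (start :: rest).length + 1) [start] []).length =
      (pvSaturate (start :: rest) (start :: rest).length [start]).length :=
    pvSameLen _ _ hAres.1 hBres.1 (fun c => (hAres.2 c).trans (hBres.2 c).symm)
  rw [show PySem.Set.empty = ([] : List (Int × Int)) from rfl]
  rw [hlen]
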